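-- pv_equiv track=rewrite | github.com/theCRIMINAL-7/AIDigitalWellbeing | patterns.py | get_pattern_severity
-- ===== SOURCE A (Python) =====
-- from typing import List, Dict
--
-- def get_pattern_severity(patterns: List[str]) -> str:
--     """Assess overall pattern severity."""
--     severity_score = 0
--
--     for pattern in patterns:
--         if "High night usage" in pattern:
--             severity_score += 3
--         elif "Long continuous sessions" in pattern:
--             severity_score += 2
--         elif "Frequent phone checking" in pattern:
--             severity_score += 2
--         elif "Social media dominance" in pattern:
--             severity_score += 2
--         elif "Usage spikes" in pattern:
--             severity_score += 1
--         elif "Binge usage" in pattern: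
--             severity_score += 2
--         elif "notification-driven" in pattern:
--             severity_score += 1
--
--     if severity_score >= 6:
--         return "High"
--     elif severity_score >= 3:
--         return "Moderate"
--     else:
--         return "Low"
-- ===== SOURCE B (Python) =====
-- WEIGHTS = [
--     ("High night usage", 3),
--     ("Long continuous sessions", 2),
--     ("Frequent phone checking", 2),
--     ("Social media dominance", 2),
--     ("Usage spikes", 1),
--     ("Binge usage", 2),
--     ("notification-driven", 1),
-- ]
--
-- def get_pattern_severity(patterns):
--     """Keyword-major staged passes: for each keyword in priority order, count the
--     still-unclaimed patterns containing it, add weight*count, and drop them from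
--     the pool (so each pattern is claimed by at most one keyword)."""
--     score = 0
--     remaining = list(patterns)
--     for kw, w in WEIGHTS:
--         matched = [p for p in remaining if kw in p]
--         score += w * len(matched)
--         remaining = [p for p in remaining if kw not in p]
--     return "High" if score >= 6 else ("Moderate" if score >= 3 else "Low")
-- ===== Notes on version B (the rewrite author's own statement) =====
-- stated objective: alternative
-- what changed: Inverts the traversal: instead of one pass over patterns with a 7-way elif chain, B makes one staged pass per keyword in priority order, counting matches in a shrinking pool of unclaimed patterns and removing them, so score = sum of weight*count per stage.
import Mathlib
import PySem

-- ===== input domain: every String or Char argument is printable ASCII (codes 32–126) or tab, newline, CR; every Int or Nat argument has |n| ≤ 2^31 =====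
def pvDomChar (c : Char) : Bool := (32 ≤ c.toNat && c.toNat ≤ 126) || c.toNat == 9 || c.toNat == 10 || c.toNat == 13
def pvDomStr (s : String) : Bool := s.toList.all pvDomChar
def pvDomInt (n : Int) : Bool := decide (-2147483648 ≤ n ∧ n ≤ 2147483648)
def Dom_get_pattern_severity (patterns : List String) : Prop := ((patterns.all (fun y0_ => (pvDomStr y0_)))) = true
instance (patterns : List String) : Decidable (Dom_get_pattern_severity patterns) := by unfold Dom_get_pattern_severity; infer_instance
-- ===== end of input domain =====

-- B inverts the loop structure: keyword-major staged passes over a shrinking pool of unclaimed patterns, instead of A's pattern-major pass with an elif chain; objective: alternative.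


-- ===== PORT A =====
def get_pattern_severity (patterns : List String) : String :=
  let severity_score : Int :=
    patterns.foldl (fun severity_score pattern =>
      if PySem.Str.isIn "High night usage" pattern then severity_score + 3
      else if PySem.Str.isIn "Long continuous sessions" pattern then severity_score + 2
      else if PySem.Str.isIn "Frequent phone checking" pattern then severity_score + 2
      else if PySem.Str.isIn "Social media dominance" pattern then severity_score + 2
      else if PySem.Str.isIn "Usage spikes" pattern then severity_score + 1
      else if PySem.Str.isIn "Binge usage" pattern then severity_score + 2
      else if PySem.Str.isIn "notification-driven" pattern then severity_score + 1
      else severity_score) 0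
  if severity_score ≥ 6 then "High"
  else if severity_score ≥ 3 then "Moderate"
  else "Low"

-- ===== PORT B =====
def pvWeights : List (String × Int) :=
  [("High night usage", 3), ("Long continuous sessions", 2), ("Frequent phone checking", 2),
   ("Social media dominance", 2), ("Usage spikes", 1), ("Binge usage", 2), ("notification-driven", 1)]

-- the 'for kw, w in WEIGHTS' loop: state = (score, remaining pool)
def get_pattern_severity_alt (patterns : List String) : String :=
  let st :=
    pvWeights.foldl (fun (st : Int × List String) kv =>
      let matched := st.2.filter (fun p => PySem.Str.isIn kv.1 p)
      let score := st.1 + kv.2 * (matched.length : Int)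
      let remaining := st.2.filter (fun p => !(PySem.Str.isIn kv.1 p))
      (score, remaining)) (0, patterns)
  if st.1 ≥ 6 then "High" else if st.1 ≥ 3 then "Moderate" else "Low"

-- ===== PRECONDITION & SPEC =====
def Spec_get_pattern_severity (patterns : List String) (out : String) : Prop := out = get_pattern_severity_alt patterns
instance (patterns : List String) (out : String) : Decidable (Spec_get_pattern_severity patterns out) := by unfold Spec_get_pattern_severity; infer_instance

-- ===== CLAIM (what is proved, stated in full; the proofs are below) =====
def Claim_equal_get_pattern_severity : Prop := ∀ (patterns : List String), Dom_get_pattern_severity patterns → Spec_get_pattern_severity patterns (get_pattern_severity patterns)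

-- ===== LEMMAS AND PROOFS =====

-- first-match weight of a pattern against a keyword table
def wOf (L : List (String × Int)) (p : String) : Int :=
  ((L.find? (fun kv => PySem.Str.isIn kv.1 p)).map Prod.snd).getD 0

-- each A-branch contributes exactly the first-match weight for the full table
lemma step_eq_weight (s : Int) (p : String) :
    (if PySem.Str.isIn "High night usage" p then s + 3
     else if PySem.Str.isIn "Long continuous sessions" p then s + 2
     else if PySem.Str.isIn "Frequent phone checking" p then s + 2
     else if PySem.Str.isIn "Social media dominance" p then s + 2
     else if PySem.Str.isIn "Usage spikes" p then s + 1
     else if PySem.Str.isIn "Binge usage" p then s + 2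
     else if PySem.Str.isIn "notification-driven" p then s + 1
     else s) = s + wOf pvWeights p := by
  unfold wOf pvWeights
  split_ifs with h1 h2 h3 h4 h5 h6 h7 <;>
    simp_all [List.find?_cons_of_pos, List.find?_cons_of_neg]

lemma a_foldl_eq_sum (patterns : List String) (s : Int) :
    patterns.foldl (fun severity_score pattern =>
      if PySem.Str.isIn "High night usage" pattern then severity_score + 3
      else if PySem.Str.isIn "Long continuous sessions" pattern then severity_score + 2
      else if PySem.Str.isIn "Frequent phone checking" pattern then severity_score + 2
      else if PySem.Str.isIn "Social media dominance" pattern then severity_score + 2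
      else if PySem.Str.isIn "Usage spikes" pattern then severity_score + 1
      else if PySem.Str.isIn "Binge usage" pattern then severity_score + 2
      else if PySem.Str.isIn "notification-driven" pattern then severity_score + 1
      else severity_score) s = s + (patterns.map (wOf pvWeights)).sum := by
  have hf : (fun (severity_score : Int) (pattern : String) =>
      if PySem.Str.isIn "High night usage" pattern then severity_score + 3
      else if PySem.Str.isIn "Long continuous sessions" pattern then severity_score + 2
      else if PySem.Str.isIn "Frequent phone checking" pattern then severity_score + 2
      else if PySem.Str.isIn "Social media dominance" pattern then severity_score + 2
      else if PySem.Str.isIn "Usage spikes" pattern then severity_score + 1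
      else if PySem.Str.isIn "Binge usage" pattern then severity_score + 2
      else if PySem.Str.isIn "notification-driven" pattern then severity_score + 1
      else severity_score) = fun s p => s + wOf pvWeights p :=
    funext fun s => funext fun p => step_eq_weight s p
  rw [hf, PySem.List.foldl_add]

-- split a mapped sum along a boolean filter
lemma sum_map_filter_split (f : String → Int) (P : String → Bool) (l : List String) :
    ((l.filter P).map f).sum + ((l.filter (fun x => !P x)).map f).sum = (l.map f).sum := by
  induction l with
  | nil => simp
  | cons a t ih =>
    by_cases h : P a = true <;> simp [h, ← ih] <;> ring

-- B's keyword-major staged loop computes the same per-pattern first-match sum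
lemma b_foldl_eq_sum (L : List (String × Int)) (rem : List String) (s : Int) :
    (L.foldl (fun (st : Int × List String) kv =>
      let matched := st.2.filter (fun p => PySem.Str.isIn kv.1 p)
      let score := st.1 + kv.2 * (matched.length : Int)
      let remaining := st.2.filter (fun p => !(PySem.Str.isIn kv.1 p))
      (score, remaining)) (s, rem)).1 = s + (rem.map (wOf L)).sum := by
  induction L generalizing rem s with
  | nil =>
    have h0 : wOf ([] : List (String × Int)) = fun _ => 0 := rfl
    simp [h0]
  | cons kv rest ih =>
    simp only [List.foldl_cons]
    rw [ih]
    have hm : ∀ p ∈ rem.filter (fun p => PySem.Str.isIn kv.1 p),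
        wOf (kv :: rest) p = kv.2 := by
      intro p hp
      have h' : (fun kv : String × Int => PySem.Chars.isIn kv.1.toList p.toList) kv = true := by
        simpa [PySem.Str.isIn] using (List.mem_filter.mp hp).2
      simp [wOf, h']
    have hn : (rem.filter (fun p => !(PySem.Str.isIn kv.1 p))).map (wOf rest)
        = (rem.filter (fun p => !(PySem.Str.isIn kv.1 p))).map (wOf (kv :: rest)) := by
      apply List.map_congr_left
      intro p hp
      have h0 := (List.mem_filter.mp hp).2
      have h' : ¬ (fun kv : String × Int => PySem.Chars.isIn kv.1.toList p.toList) kv = true := by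
        simp only [Bool.not_eq_eq_eq_not, Bool.not_true] at h0
        simpa [PySem.Str.isIn] using h0
      simp [wOf, h']
    have hmatch : ((rem.filter (fun p => PySem.Str.isIn kv.1 p)).map (wOf (kv :: rest))).sum
        = kv.2 * ((rem.filter (fun p => PySem.Str.isIn kv.1 p)).length : Int) := by
      rw [List.map_congr_left hm]
      simp [List.sum_replicate, mul_comm]
    have := sum_map_filter_split (wOf (kv :: rest)) (fun p => PySem.Str.isIn kv.1 p) rem
    rw [hn, ← this, hmatch]
    ring

-- ===== VERDICT (by name: the statement is the Claim_ definition above) =====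
theorem get_pattern_severity_spec : Claim_equal_get_pattern_severity := by
  intro patterns _
  unfold Spec_get_pattern_severity get_pattern_severity get_pattern_severity_alt
  simp only [a_foldl_eq_sum, b_foldl_eq_sum, zero_add]
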